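-- pv_equiv track=rewrite | github.com/blythest/psst_hb_final_project | parse_nmap_data.py | return_common_protocols
-- ===== SOURCE A (Python) =====
-- def return_common_protocols(tuple_list):
--
--     """
--     function takes a list of tuples of the form
--     ("Linux 2.4.21 - 2.4.31 (embedded)", "https").
--     Returns a list of indexes that share a protocol.
--     """
--
--
--     common_protocols_dict = {}
--     # common_protocol_dict = {}
--     itr = 0
--
--     for t in tuple_list:
--         protocol_key = t[1]
--
--         if protocol_key in common_protocols_dict:
--             common_protocols_dict[protocol_key].append(itr)
--         else:
--             common_protocols_dict[protocol_key] = [itr]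
--
--         itr += 1
--     return common_protocols_dict
-- ===== SOURCE B (Python) =====
-- def return_common_protocols(tuple_list):
--     """
--     Same grouping task, written as two passes: first collect the distinct
--     protocols in first-occurrence order, then build each index list by a
--     comprehension over an enumeration of the input.
--     """
--     protocols = list(dict.fromkeys(p for _, p in tuple_list))
--     return {p: [i for i, (_, q) in enumerate(tuple_list) if q == p]
--             for p in protocols}
-- ===== Notes on version B (the rewrite author's own statement) =====
-- stated objective: simpler
-- what changed: B replaces A's single counter-carrying pass that mutates dict entries with two declarative passes: dict.fromkeys collects the distinct protocols in first-occurrence order, then a dict comprehension builds each protocol's index list by an enumerate-filter comprehension.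
import Mathlib
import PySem

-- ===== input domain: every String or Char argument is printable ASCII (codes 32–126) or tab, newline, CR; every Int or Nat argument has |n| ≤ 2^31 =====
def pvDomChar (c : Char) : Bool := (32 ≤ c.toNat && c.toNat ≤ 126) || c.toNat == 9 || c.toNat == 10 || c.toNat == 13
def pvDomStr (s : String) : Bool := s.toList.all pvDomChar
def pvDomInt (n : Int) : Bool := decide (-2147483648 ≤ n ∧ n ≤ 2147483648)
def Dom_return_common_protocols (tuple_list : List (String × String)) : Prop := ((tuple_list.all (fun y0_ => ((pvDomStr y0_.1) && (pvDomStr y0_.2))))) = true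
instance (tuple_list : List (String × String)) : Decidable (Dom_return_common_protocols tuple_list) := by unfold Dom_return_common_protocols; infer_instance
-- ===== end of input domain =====

-- B groups indexes by protocol in two passes (distinct protocols in first-occurrence order,
-- then one index comprehension per protocol) instead of A's single dict-accumulating pass; objective: simpler.

-- ===== PORT A =====
def return_common_protocols (tuple_list : List (String × String)) : List (String × List Int) :=
  -- common_protocols_dict = {}; itr = 0; for t in tuple_list: …; itr += 1
  ((tuple_list.foldl
      (fun (st : PySem.Dict String (List Int) × Int) (t : String × String) =>
        let protocol_key := t.2
        let d := if st.1.contains protocol_key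
          then st.1.modify protocol_key [] (fun v => v ++ [st.2])  -- d[protocol_key].append(itr); key present
          else st.1.insert protocol_key [st.2]
        (d, st.2 + 1))
      (PySem.Dict.empty, 0)).1).items

-- ===== PORT B =====
def return_common_protocols_alt (tuple_list : List (String × String)) : List (String × List Int) :=
  -- protocols = list(dict.fromkeys(p for _, p in tuple_list))
  let protocols := PySem.List.dedup (tuple_list.map (fun t => t.2))
  -- {p: [i for i, (_, q) in enumerate(tuple_list) if q == p] for p in protocols}
  protocols.map (fun p =>
    (p, ((PySem.List.enumerate tuple_list 0).filter (fun iq => iq.2.2 == p)).map (fun iq => iq.1)))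

-- ===== PRECONDITION & SPEC =====
def Spec_return_common_protocols (tuple_list : List (String × String)) (out : List (String × List Int)) : Prop := out = return_common_protocols_alt tuple_list
instance (tuple_list : List (String × String)) (out : List (String × List Int)) : Decidable (Spec_return_common_protocols tuple_list out) := by unfold Spec_return_common_protocols; infer_instance

-- ===== CLAIM (what is proved, stated in full; the proofs are below) =====
def Claim_equal_return_common_protocols : Prop := ∀ (tuple_list : List (String × String)), Dom_return_common_protocols tuple_list → Spec_return_common_protocols tuple_list (return_common_protocols tuple_list)

-- ===== LEMMAS AND PROOFS =====

-- A's if/else branch is exactly one dict "modify" (append-with-default) step.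
theorem rcp_branch_eq_modify (d : PySem.Dict String (List Int)) (k : String) (i : Int) :
    (if d.contains k then d.modify k [] (fun v => v ++ [i]) else d.insert k [i])
      = d.modify k [] (fun v => v ++ [i]) := by
  by_cases h : d.contains k
  · simp [h]
  · simp only [Bool.not_eq_true] at h
    simp [h, PySem.Dict.modify, pysem]

-- A's counter-carrying fold is the fold over the enumeration of the list.
theorem rcp_fold_enumerate (l : List (String × String)) (d : PySem.Dict String (List Int)) (i : Int) :
    (l.foldl
      (fun (st : PySem.Dict String (List Int) × Int) (t : String × String) =>
        let protocol_key := t.2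
        let d' := if st.1.contains protocol_key
          then st.1.modify protocol_key [] (fun v => v ++ [st.2])
          else st.1.insert protocol_key [st.2]
        (d', st.2 + 1))
      (d, i)).1
    = (PySem.List.enumerate l i).foldl
        (fun d (p : Int × (String × String)) => d.modify p.2.2 [] (fun v => v ++ [p.1])) d := by
  induction l generalizing d i with
  | nil => simp [PySem.List.enumerate_nil]
  | cons t rest ih =>
    rw [PySem.List.enumerate_cons]
    simp only [List.foldl_cons]
    rw [rcp_branch_eq_modify]
    exact ih _ _

theorem return_common_protocols_eq (l : List (String × String)) :
    return_common_protocols l = return_common_protocols_alt l := by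
  unfold return_common_protocols return_common_protocols_alt
  rw [rcp_fold_enumerate]
  set en := PySem.List.enumerate l 0 with hen
  have hmap : ((en.map (fun q => (q.2.2, q.1))).foldl
      (fun (d : PySem.Dict String (List Int)) (p : String × Int) => d.modify p.1 [] (fun v => v ++ [p.2]))
      PySem.Dict.empty)
      = en.foldl (fun d (p : Int × (String × String)) => d.modify p.2.2 [] (fun v => v ++ [p.1]))
          PySem.Dict.empty := by
    rw [List.foldl_map]
  rw [← hmap]
  set l' := en.map (fun q => (q.2.2, q.1)) with hl'
  set D := l'.foldl
      (fun (d : PySem.Dict String (List Int)) (p : String × Int) => d.modify p.1 [] (fun v => v ++ [p.2]))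
      PySem.Dict.empty with hD
  have hnodup : D.keys.Nodup := by
    rw [hD]
    exact PySem.Dict.nodup_keys_foldl_modify_key l' (fun p => p.1) []
      (fun d p => fun v => v ++ [p.2]) PySem.Dict.empty (by simp)
  have hkeys : D.keys = PySem.List.dedup (l.map (fun t => t.2)) := by
    rw [hD, PySem.Dict.keys_foldl_modify_key]
    have h1 : l'.map (fun p => p.1) = l.map (fun t => t.2) := by
      rw [hl', List.map_map]
      have := PySem.List.map_snd_enumerate l (0 : Int)
      calc en.map ((fun p => p.1) ∘ (fun q => (q.2.2, q.1)))
          = (en.map (fun q => q.2)).map (fun t => t.2) := by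
            rw [List.map_map]; rfl
        _ = l.map (fun t => t.2) := by rw [hen, this]
    rw [h1]
    simp [PySem.Set.update, PySem.Set.ofList, PySem.Dict.keys_empty]
  have hgetD : ∀ c, D.getD c [] = (en.filter (fun iq => iq.2.2 == c)).map (fun iq => iq.1) := by
    intro c
    rw [hD, PySem.Dict.getD_foldl_modify_append]
    rw [hl', List.filter_map, List.map_map]
    simp [Function.comp_def, PySem.Dict.getD_empty]
  rw [PySem.Dict.items_eq_map_keys D hnodup [], hkeys]
  apply List.map_congr_left
  intro p _
  rw [hgetD p]

-- ===== VERDICT (by name: the statement is the Claim_ definition above) =====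
theorem return_common_protocols_spec : Claim_equal_return_common_protocols := by
  intro tuple_list _
  unfold Spec_return_common_protocols
  exact return_common_protocols_eq tuple_list
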